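-- pv_equiv track=rewrite | github.com/soc221b/namanager | file_checker/util.py | convert_words_to_case
-- ===== SOURCE A (Python) =====
-- def convert_word_to_case(word, case):
--     """
--     Only support pascal case,
--     because camel case is sensible for multiple words,
--     user can just change first letter to lowercase.
--     """
--
--     if case == 'upper_case':
--         word = word.upper()
--     if case == 'lower_case':
--         word = word.lower()
--     if case == 'pascal_case':
--         word = word[0].upper() + word[1:].lower()
--
--     return word
--
-- def convert_words_to_case(words, case):
--     """
--     This function assuming that
--     all words are well separated and
--     not included empty string:
--         Ok:
--             ['_*&', 'Http', 'protocol', '#$%']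
--         Wrong:
--             ['_*&h', 'ttp', 'protocol', '#$%']
--     """
--
--     converted_words = []
--
--     if case == 'camel_case':
--         first_word_occured = False
--         for w in words:
--             word = convert_word_to_case(w, 'pascal_case')
--             if not first_word_occured and word[0].isalpha():
--                 word = word[0].lower() + word[1:]
--                 first_word_occured = True
--             converted_words.append(word)
--
--     elif case in ['upper_case', 'lower_case', 'pascal_case']:
--         for w in words:
--             converted_words.append(convert_word_to_case(w, case))
--
--     return converted_words
-- ===== SOURCE B (Python) =====
-- def convert_words_to_case(words, case):
--     if case == 'upper_case':
--         return [w.upper() for w in words]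
--     if case == 'lower_case':
--         return [w.lower() for w in words]
--     if case == 'pascal_case':
--         return [w[0].upper() + w[1:].lower() for w in words]
--     if case != 'camel_case':
--         return []
--     # split at the first word that starts with a letter: pascal the prefix,
--     # fully lowercase that word, pascal the remainder
--     k = next((i for i, w in enumerate(words) if w[0].isalpha()), len(words))
--     return ([w[0].upper() + w[1:].lower() for w in words[:k]]
--             + [w[0].lower() + w[1:].lower() for w in words[k:k + 1]]
--             + [w[0].upper() + w[1:].lower() for w in words[k + 1:]])
-- ===== Notes on version B (the rewrite author's own statement) =====
-- stated objective: alternative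
-- what changed: The camel_case branch no longer runs A's single stateful pass with a first_word_occured flag that pascal-converts every word and then patches the flagged one: B locates the index k of the first word of the INPUT starting with a letter, and returns the concatenation of three slices words[:k], words[k:k+1], words[k+1:], pascal-casing the outer slices and lowercasing the middle word directly (it is never pascal-converted); the other case branches become direct comprehensions and unmatched cases return [].
import Mathlib
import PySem

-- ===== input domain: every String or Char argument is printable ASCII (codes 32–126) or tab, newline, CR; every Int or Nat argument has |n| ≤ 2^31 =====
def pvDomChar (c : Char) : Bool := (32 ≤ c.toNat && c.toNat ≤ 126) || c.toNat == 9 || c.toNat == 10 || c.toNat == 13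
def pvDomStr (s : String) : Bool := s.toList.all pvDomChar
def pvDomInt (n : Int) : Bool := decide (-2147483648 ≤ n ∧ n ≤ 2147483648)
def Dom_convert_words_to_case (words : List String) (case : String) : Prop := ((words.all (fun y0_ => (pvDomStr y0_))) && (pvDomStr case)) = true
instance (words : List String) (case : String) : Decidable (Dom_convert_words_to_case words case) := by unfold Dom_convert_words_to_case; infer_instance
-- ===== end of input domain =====

-- B replaces A's single stateful camel pass (first_word_occured flag) by a split-at-index
-- decomposition: locate the first word starting with a letter on the INPUT list, then emit
-- three slices (pascal prefix, that one word fully lowercased directly, pascal suffix)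
-- without ever pascal-converting the located word (objective: alternative).

-- ===== PORT A =====
-- word[0].upper() + word[1:].lower(); word[0] raises IndexError on "" (excluded by Pre_): we keep word there
def convert_word_to_case (word : String) (case : String) : String :=
  let word := if case == "upper_case" then PySem.Str.upper word else word
  let word := if case == "lower_case" then PySem.Str.lower word else word
  let word := if case == "pascal_case" then
      match PySem.Str.pyGet? word 0 with
      | some c => String.ofList (PySem.Chars.upperChar c ::
          PySem.Chars.lower (PySem.Str.slice word (some 1) none).toList)
      | none => word
    else word
  word

-- word[0].isalpha(); word[0] raises IndexError on "" (unreachable under Pre_): false there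
def pvIsAlphaFirst (word : String) : Bool :=
  match PySem.Str.pyGet? word 0 with
  | some c => PySem.Chars.isalpha c
  | none => false

-- word[0].lower() + word[1:] (A's camel patch; word is nonempty whenever A reaches this)
def pvLowerFirstA (word : String) : String :=
  match PySem.Str.pyGet? word 0 with
  | some c => String.ofList (PySem.Chars.lowerChar c :: (PySem.Str.slice word (some 1) none).toList)
  | none => word

def convert_words_to_case (words : List String) (case : String) : List String :=
  if case == "camel_case" then
    (words.foldl (fun (st : List String × Bool) w =>
        let word := convert_word_to_case w "pascal_case"
        if !st.2 && pvIsAlphaFirst word then (st.1 ++ [pvLowerFirstA word], true)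
        else (st.1 ++ [word], st.2)) (([] : List String), false)).1
  else if case == "upper_case" || case == "lower_case" || case == "pascal_case" then
    words.foldl (fun acc w => acc ++ [convert_word_to_case w case]) []
  else []

-- ===== PORT B =====
-- w[0].upper() + w[1:].lower(); w[0] raises IndexError on "" (excluded by Pre_): we keep w there
def pvPascalB (w : String) : String :=
  match PySem.Str.pyGet? w 0 with
  | some c => String.ofList (PySem.Chars.upperChar c ::
      PySem.Chars.lower (PySem.Str.slice w (some 1) none).toList)
  | none => w

-- w[0].lower() + w[1:].lower(); same IndexError caveat on ""
def pvCamelB (w : String) : String :=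
  match PySem.Str.pyGet? w 0 with
  | some c => String.ofList (PySem.Chars.lowerChar c ::
      PySem.Chars.lower (PySem.Str.slice w (some 1) none).toList)
  | none => w

-- w[0].isalpha(); same IndexError caveat on ""
def pvFirstAlphaW (w : String) : Bool :=
  match PySem.Str.pyGet? w 0 with
  | some c => PySem.Chars.isalpha c
  | none => false

-- k = next((i for i, w in enumerate(words) if w[0].isalpha()), len(words));
-- words[:k] / words[k:k+1] / words[k+1:] are the three slices (all bounds nonnegative and in range)
def pvCamelSplitB (words : List String) : List String :=
  let k : Nat := match words.findIdx? pvFirstAlphaW with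
    | some i => i
    | none => words.length
  (words.take k).map pvPascalB ++ ((words.drop k).take 1).map pvCamelB ++
    (words.drop (k + 1)).map pvPascalB

def convert_words_to_case_alt (words : List String) (case : String) : List String :=
  if case == "upper_case" then words.map PySem.Str.upper
  else if case == "lower_case" then words.map PySem.Str.lower
  else if case == "pascal_case" then words.map pvPascalB
  else if case ≠ "camel_case" then []
  else pvCamelSplitB words

-- ===== PRECONDITION & SPEC =====
-- Pre_ excludes exactly the inputs on which A raises IndexError: an empty-string word
-- together with case 'pascal_case' or 'camel_case' (word[0] on '').
def Pre_convert_words_to_case (words : List String) (case : String) : Prop :=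
  ¬ ("" ∈ words ∧ (case = "camel_case" ∨ case = "pascal_case"))
instance (words : List String) (case : String) : Decidable (Pre_convert_words_to_case words case) := by
  unfold Pre_convert_words_to_case; infer_instance

def pvWitness_convert_words_to_case : List String × String := (["Http", "protocol"], "camel_case")

def Spec_convert_words_to_case (words : List String) (case : String) (out : List String) : Prop := out = convert_words_to_case_alt words case
instance (words : List String) (case : String) (out : List String) : Decidable (Spec_convert_words_to_case words case out) := by unfold Spec_convert_words_to_case; infer_instance

-- ===== CLAIM (what is proved, stated in full; the proofs are below) =====
def Claim_equal_convert_words_to_case : Prop := ∀ (words : List String) (case : String), Dom_convert_words_to_case words case → Pre_convert_words_to_case words case → Spec_convert_words_to_case words case (convert_words_to_case words case)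

-- ===== LEMMAS AND PROOFS =====

-- character-level facts (ASCII arithmetic of PySem.Chars)
lemma islower_iff (c : Char) : PySem.Chars.islower c = true ↔ 97 ≤ c.toNat ∧ c.toNat ≤ 122 := by
  simp only [PySem.Chars.islower, Bool.and_eq_true, decide_eq_true_eq, Char.le_def,
    UInt32.le_iff_toNat_le]
  exact Iff.rfl

lemma isupper_iff (c : Char) : PySem.Chars.isupper c = true ↔ 65 ≤ c.toNat ∧ c.toNat ≤ 90 := by
  simp only [PySem.Chars.isupper, Bool.and_eq_true, decide_eq_true_eq, Char.le_def,
    UInt32.le_iff_toNat_le]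
  exact Iff.rfl

lemma toNat_sub32 (c : Char) (h1 : 97 ≤ c.toNat) (h2 : c.toNat ≤ 122) :
    (Char.ofNat (c.toNat - 32)).toNat = c.toNat - 32 := by
  rw [Char.toNat_ofNat, if_pos]; left; omega

lemma alpha_upperChar (c : Char) :
    PySem.Chars.isalpha (PySem.Chars.upperChar c) = PySem.Chars.isalpha c := by
  by_cases hl : PySem.Chars.islower c = true
  · obtain ⟨h1, h2⟩ := (islower_iff c).mp hl
    have hu : PySem.Chars.isupper (PySem.Chars.upperChar c) = true := by
      rw [isupper_iff, PySem.Chars.upperChar, if_pos hl, toNat_sub32 c h1 h2]; omega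
    simp [PySem.Chars.isalpha, hu, hl]
  · simp only [PySem.Chars.upperChar, if_neg hl]

lemma lower_upperChar (c : Char) :
    PySem.Chars.lowerChar (PySem.Chars.upperChar c) = PySem.Chars.lowerChar c := by
  by_cases hl : PySem.Chars.islower c = true
  · obtain ⟨h1, h2⟩ := (islower_iff c).mp hl
    have ht := toNat_sub32 c h1 h2
    have hu : PySem.Chars.isupper (PySem.Chars.upperChar c) = true := by
      rw [isupper_iff, PySem.Chars.upperChar, if_pos hl, ht]; omega
    have hnc : PySem.Chars.isupper c = false := by
      rw [Bool.eq_false_iff]; intro h; have := (isupper_iff c).mp h; omega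
    rw [PySem.Chars.lowerChar, if_pos hu, PySem.Chars.upperChar, if_pos hl, ht,
      PySem.Chars.lowerChar, if_neg (by simp [hnc])]
    have h32 : c.toNat - 32 + 32 = c.toNat := by omega
    rw [h32, Char.ofNat_toNat]
  · simp only [PySem.Chars.upperChar, if_neg hl]

-- A's camel loop, written as structural recursion (proved equal to the foldl below)
def camelSpec : List String → Bool → List String
  | [], _ => []
  | w :: ws, flag =>
    let word := convert_word_to_case w "pascal_case"
    if !flag && pvIsAlphaFirst word then pvLowerFirstA word :: camelSpec ws true
    else word :: camelSpec ws flag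

lemma camel_foldl (ws : List String) : ∀ (acc : List String) (flag : Bool),
    (ws.foldl (fun (st : List String × Bool) w =>
        let word := convert_word_to_case w "pascal_case"
        if !st.2 && pvIsAlphaFirst word then (st.1 ++ [pvLowerFirstA word], true)
        else (st.1 ++ [word], st.2)) (acc, flag)).1 = acc ++ camelSpec ws flag := by
  induction ws with
  | nil => intro acc flag; simp [camelSpec]
  | cons w ws ih =>
    intro acc flag
    simp only [List.foldl_cons, camelSpec]
    by_cases h : (!flag && pvIsAlphaFirst (convert_word_to_case w "pascal_case")) = true
    · rw [if_pos h, if_pos h, ih, List.append_assoc]; rfl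
    · rw [if_neg h, if_neg h, ih, List.append_assoc]; rfl

-- A's pascal conversion is B's (same expression once the dead branches are dropped)
lemma pascal_eq (w : String) : convert_word_to_case w "pascal_case" = pvPascalB w := by
  simp [convert_word_to_case, pvPascalB]

lemma str_ne_empty_cons (w : String) (hw : w ≠ "") : ∃ c cs, w.toList = c :: cs := by
  refine List.exists_cons_of_ne_nil (fun h => hw ?_)
  exact String.toList_eq_nil_iff.mp h

-- A tests pascal(w)[0].isalpha(); B tests w[0].isalpha(): equal since upperChar preserves alpha
lemma first_alpha_eq (w : String) : pvIsAlphaFirst (pvPascalB w) = pvFirstAlphaW w := by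
  by_cases hw : w = ""
  · subst hw; rfl
  · obtain ⟨c, cs, hc⟩ := str_ne_empty_cons w hw
    simp [pvIsAlphaFirst, pvFirstAlphaW, pvPascalB, hc, alpha_upperChar]

-- A's camel patch of the pascal word equals B's direct all-lowercase word
lemma patch_eq (w : String) : pvLowerFirstA (pvPascalB w) = pvCamelB w := by
  by_cases hw : w = ""
  · subst hw; rfl
  · obtain ⟨c, cs, hc⟩ := str_ne_empty_cons w hw
    simp [pvLowerFirstA, pvPascalB, pvCamelB, hc, lower_upperChar,
      PySem.List.slice_from_one]

lemma camelSpec_true (ws : List String) : camelSpec ws true = ws.map pvPascalB := by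
  induction ws with
  | nil => rfl
  | cons w ws ih => simp [camelSpec, pascal_eq, ih]

lemma camB_cons_neg (w : String) (ws : List String) (hp : pvFirstAlphaW w = false) :
    pvCamelSplitB (w :: ws) = pvPascalB w :: pvCamelSplitB ws := by
  unfold pvCamelSplitB
  rw [List.findIdx?_cons, hp]
  cases hf : ws.findIdx? pvFirstAlphaW with
  | some i => simp
  | none =>
    have h1 : ws.drop (ws.length + 1) = [] := List.drop_eq_nil_of_le (by omega)
    simp [List.take_length, List.drop_length, h1]

lemma camelSpec_false (ws : List String) : camelSpec ws false = pvCamelSplitB ws := by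
  induction ws with
  | nil => rfl
  | cons w ws ih =>
    by_cases hp : pvFirstAlphaW w = true
    · simp only [camelSpec, pascal_eq, Bool.not_false, Bool.true_and, first_alpha_eq, hp,
        if_pos, camelSpec_true, patch_eq]
      unfold pvCamelSplitB
      rw [List.findIdx?_cons, hp]
      simp
    · rw [camB_cons_neg w ws (Bool.eq_false_iff.mpr hp), ← ih]
      simp only [camelSpec, pascal_eq, Bool.not_false, Bool.true_and, first_alpha_eq]
      rw [if_neg hp]

lemma word_upper (w : String) : convert_word_to_case w "upper_case" = PySem.Str.upper w := by
  simp [convert_word_to_case]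

lemma word_lower (w : String) : convert_word_to_case w "lower_case" = PySem.Str.lower w := by
  simp [convert_word_to_case]

-- ===== VERDICT (by name: the statement is the Claim_ definition above) =====
theorem convert_words_to_case_spec : Claim_equal_convert_words_to_case := by
  intro words case _ _
  unfold Spec_convert_words_to_case convert_words_to_case convert_words_to_case_alt
  by_cases h1 : case = "camel_case"
  · subst h1
    rw [if_pos (show (("camel_case":String) == "camel_case") = true from rfl),
      camel_foldl words, List.nil_append, camelSpec_false words,
      if_neg (show ¬(("camel_case":String) == "upper_case") = true from by decide),
      if_neg (show ¬(("camel_case":String) == "lower_case") = true from by decide),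
      if_neg (show ¬(("camel_case":String) == "pascal_case") = true from by decide),
      if_neg (show ¬("camel_case" ≠ "camel_case") from by simp)]
  · by_cases h2 : case = "upper_case"
    · subst h2
      rw [if_neg (show ¬(("upper_case":String) == "camel_case") = true from by decide),
        if_pos (show (("upper_case":String) == "upper_case" || ("upper_case":String) == "lower_case" || ("upper_case":String) == "pascal_case") = true from by decide),
        if_pos (show (("upper_case":String) == "upper_case") = true from rfl),
        PySem.List.foldl_append_singleton_eq_map]
      exact List.map_congr_left fun w _ => word_upper w
    · by_cases h3 : case = "lower_case"
      · subst h3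
        rw [if_neg (show ¬(("lower_case":String) == "camel_case") = true from by decide),
          if_pos (show (("lower_case":String) == "upper_case" || ("lower_case":String) == "lower_case" || ("lower_case":String) == "pascal_case") = true from by decide),
          if_neg (show ¬(("lower_case":String) == "upper_case") = true from by decide),
          if_pos (show (("lower_case":String) == "lower_case") = true from rfl),
          PySem.List.foldl_append_singleton_eq_map]
        exact List.map_congr_left fun w _ => word_lower w
      · by_cases h4 : case = "pascal_case"
        · subst h4
          rw [if_neg (show ¬(("pascal_case":String) == "camel_case") = true from by decide),
            if_pos (show (("pascal_case":String) == "upper_case" || ("pascal_case":String) == "lower_case" || ("pascal_case":String) == "pascal_case") = true from by decide),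
            if_neg (show ¬(("pascal_case":String) == "upper_case") = true from by decide),
            if_neg (show ¬(("pascal_case":String) == "lower_case") = true from by decide),
            if_pos (show (("pascal_case":String) == "pascal_case") = true from rfl),
            PySem.List.foldl_append_singleton_eq_map]
          exact List.map_congr_left fun w _ => pascal_eq w
        · simp [h1, h2, h3, h4]
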